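-- pv_equiv track=rewrite | github.com/trec-auto-judge/auto-judge-evaluate | src/autojudge_evaluate/correlation_diagnostics.py | format_issues_warning
-- ===== SOURCE A (Python) =====
-- from collections import defaultdict
-- from typing import Dict, List, Literal, Optional, Tuple
--
-- CorrelationIssue = Literal[
--     "measure_defaulted",
--     "too_few",
--     "all_tied",
--     "length_mismatch",
-- ]
--
-- def format_issues_warning(
--     issues: List[Tuple[str, str, str, CorrelationIssue]],
--     eval_label: str,
--     diagnostics_dir_was_set: bool,
-- ) -> str:
--     """Short recap for the end-of-evaluate() warning.
--
--     `issues` is a list of (truth_m, eval_m, method, issue) tuples.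
--     """
--     by_type: Dict[str, List[Tuple[str, str, str]]] = defaultdict(list)
--     for tm, em, method, issue in issues:
--         by_type[issue].append((tm, em, method))
--
--     lines = [f"[{eval_label}] correlation issues in {len(issues)} (measure, method) combination(s):"]
--     for issue, triples in sorted(by_type.items()):
--         example = triples[0]
--         lines.append(f"  {issue}: {len(triples)} (e.g., {example})")
--     if not diagnostics_dir_was_set:
--         lines.append("Rerun with --diagnostics-dir <path> for per-run details.")
--     return "\n".join(lines)
-- ===== SOURCE B (Python) =====
-- def format_issues_warning(issues, eval_label, diagnostics_dir_was_set):
--     """Sort-then-scan re-implementation: stable sort by issue type, then one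
--     linear pass over contiguous groups (no dict)."""
--     lines = [f"[{eval_label}] correlation issues in {len(issues)} (measure, method) combination(s):"]
--     ordered = sorted(issues, key=lambda t: t[3])
--     i, n = 0, len(ordered)
--     while i < n:
--         tm, em, method, issue = ordered[i]
--         j = i + 1
--         while j < n and ordered[j][3] == issue:
--             j += 1
--         lines.append(f"  {issue}: {j - i} (e.g., {(tm, em, method)})")
--         i = j
--     if not diagnostics_dir_was_set:
--         lines.append("Rerun with --diagnostics-dir <path> for per-run details.")
--     return "\n".join(lines)
-- ===== Notes on version B (the rewrite author's own statement) =====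
-- stated objective: alternative
-- what changed: Replaces the defaultdict grouping plus sort of dict items by a stable sort of the issue list followed by a single linear scan over the contiguous equal-issue runs (count = run length, example = run head).
import Mathlib
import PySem

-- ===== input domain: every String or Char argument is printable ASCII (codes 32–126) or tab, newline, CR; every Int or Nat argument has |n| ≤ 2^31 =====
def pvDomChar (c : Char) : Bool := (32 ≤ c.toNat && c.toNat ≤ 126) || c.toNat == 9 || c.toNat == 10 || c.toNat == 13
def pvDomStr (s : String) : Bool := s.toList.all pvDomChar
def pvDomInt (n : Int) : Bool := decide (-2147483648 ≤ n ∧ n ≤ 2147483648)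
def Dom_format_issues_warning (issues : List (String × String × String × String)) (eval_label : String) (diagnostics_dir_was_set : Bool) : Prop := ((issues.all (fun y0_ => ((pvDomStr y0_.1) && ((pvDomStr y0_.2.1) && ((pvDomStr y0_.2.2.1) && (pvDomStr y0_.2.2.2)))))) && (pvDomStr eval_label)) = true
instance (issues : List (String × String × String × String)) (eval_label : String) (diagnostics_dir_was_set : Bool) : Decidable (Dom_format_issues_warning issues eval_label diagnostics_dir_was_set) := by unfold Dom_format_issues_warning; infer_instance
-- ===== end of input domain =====

-- B replaces the defaultdict grouping + sort of dict items by a stable sort of the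
-- issue list followed by one linear scan over the contiguous groups (alternative
-- algorithm, same cost class); return values proved equal on the whole domain.

-- shared f-string semantics: Python repr() of a str (exact on the Dom character set:
-- printable ASCII plus tab/newline/CR — these are exactly the chars Python escapes
-- as \\, \t, \n, \r or the chosen quote; all other Dom chars print verbatim)
def pyReprChar (q c : Char) : String :=
  if c = '\\' then "\\\\"
  else if c = Char.ofNat 9 then "\\t"
  else if c = Char.ofNat 10 then "\\n"
  else if c = Char.ofNat 13 then "\\r"
  else if c = q then "\\" ++ String.singleton c
  else String.singleton c

-- Python picks double quotes iff the string contains ' and no "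
def pyReprStr (s : String) : String :=
  let cs := s.toList
  let q : Char := if cs.contains '\'' && !(cs.contains '"') then '"' else '\''
  String.singleton q ++ PySem.Str.join "" (cs.map (pyReprChar q)) ++ String.singleton q

-- f"{(tm, em, method)}" : str() of a 3-tuple of strings = repr of the tuple
def reprTriple (t : String × String × String) : String :=
  "(" ++ pyReprStr t.1 ++ ", " ++ pyReprStr t.2.1 ++ ", " ++ pyReprStr t.2.2 ++ ")"

-- ===== PORT A =====
-- sorted(by_type.items()) compares (key, list) pairs lexicographically; the dict's
-- keys are distinct, so this is the sort by the first component used here.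
-- triples[0] is ported as headD: every stored list is nonempty by construction.
def format_issues_warning (issues : List (String × String × String × String)) (eval_label : String) (diagnostics_dir_was_set : Bool) : String :=
  let by_type : PySem.Dict String (List (String × String × String)) :=
    issues.foldl (fun d t => d.modify t.2.2.2 [] (fun v => v ++ [(t.1, t.2.1, t.2.2.1)])) PySem.Dict.empty
  let lines : List String :=
    ["[" ++ eval_label ++ "] correlation issues in " ++ PySem.Int.toStr (issues.length : Int) ++ " (measure, method) combination(s):"]
  let lines := lines ++ (PySem.List.sorted by_type.items (fun p => p.1) false).map
      (fun p => "  " ++ p.1 ++ ": " ++ PySem.Int.toStr (p.2.length : Int) ++ " (e.g., " ++ reprTriple (p.2.headD ("", "", "")) ++ ")")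
  let lines := if !diagnostics_dir_was_set then lines ++ ["Rerun with --diagnostics-dir <path> for per-run details."] else lines
  PySem.Str.join "\n" lines

-- ===== PORT B =====
-- the inner `while j < n and ordered[j][3] == issue` scan of Source B: take the run of
-- equal-issue tuples, emit one line (count = run length, example = first tuple),
-- continue at the first tuple past the run
def groupLines : List (String × String × String × String) → List String
  | [] => []
  | t :: rest =>
    ("  " ++ t.2.2.2 ++ ": " ++ PySem.Int.toStr (((rest.takeWhile (fun u => u.2.2.2 == t.2.2.2)).length + 1 : Nat) : Int)
       ++ " (e.g., " ++ reprTriple (t.1, t.2.1, t.2.2.1) ++ ")")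
      :: groupLines (rest.dropWhile (fun u => u.2.2.2 == t.2.2.2))
termination_by l => l.length
decreasing_by
  simpa using Nat.lt_succ_of_le (List.length_dropWhile_le _ rest)

def format_issues_warning_alt (issues : List (String × String × String × String)) (eval_label : String) (diagnostics_dir_was_set : Bool) : String :=
  let lines : List String :=
    ["[" ++ eval_label ++ "] correlation issues in " ++ PySem.Int.toStr (issues.length : Int) ++ " (measure, method) combination(s):"]
  let lines := lines ++ groupLines (PySem.List.sorted issues (fun t => t.2.2.2) false)
  let lines := if !diagnostics_dir_was_set then lines ++ ["Rerun with --diagnostics-dir <path> for per-run details."] else lines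
  PySem.Str.join "\n" lines

-- ===== PRECONDITION & SPEC =====
def Spec_format_issues_warning (issues : List (String × String × String × String)) (eval_label : String) (diagnostics_dir_was_set : Bool) (out : String) : Prop := out = format_issues_warning_alt issues eval_label diagnostics_dir_was_set
instance (issues : List (String × String × String × String)) (eval_label : String) (diagnostics_dir_was_set : Bool) (out : String) : Decidable (Spec_format_issues_warning issues eval_label diagnostics_dir_was_set out) := by unfold Spec_format_issues_warning; infer_instance

-- ===== CLAIM (what is proved, stated in full; the proofs are below) =====
def Claim_equal_format_issues_warning : Prop := ∀ (issues : List (String × String × String × String)) (eval_label : String) (diagnostics_dir_was_set : Bool), Dom_format_issues_warning issues eval_label diagnostics_dir_was_set → Spec_format_issues_warning issues eval_label diagnostics_dir_was_set (format_issues_warning issues eval_label diagnostics_dir_was_set)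

-- ===== LEMMAS AND PROOFS =====

-- the issue key and the projection to (truth_m, eval_m, method)
def keyf (t : String × String × String × String) : String := t.2.2.2
def projf (t : String × String × String × String) : String × String × String := (t.1, t.2.1, t.2.2.1)

-- the line both programs emit for issue type k whose triples are ts
def lineFor (k : String) (ts : List (String × String × String)) : String :=
  "  " ++ k ++ ": " ++ PySem.Int.toStr (ts.length : Int) ++ " (e.g., " ++ reprTriple (ts.headD ("", "", "")) ++ ")"

-- the distinct keys of a run-grouped list, in order of first appearance
def keysOf : List (String × String × String × String) → List String
  | [] => []
  | t :: rest => keyf t :: keysOf (rest.dropWhile (fun u => keyf u == keyf t))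
termination_by l => l.length
decreasing_by
  simpa using Nat.lt_succ_of_le (List.length_dropWhile_le _ rest)

-- STABILITY of Python's sort: filtering one key class commutes with sorting
theorem insertBy_filter (key : (String × String × String × String) → String) (c : String)
    (x : String × String × String × String) (acc : List (String × String × String × String))
    (hs : acc.Pairwise (fun a b => key a ≤ key b)) :
    (PySem.List.insertBy (fun a b => decide (key a < key b)) x acc).filter (fun t => key t == c)
      = acc.filter (fun t => key t == c) ++ (if key x == c then [x] else []) := by
  induction acc with
  | nil => simp [PySem.List.insertBy, List.filter]; split <;> simp_all
  | cons y ys ih =>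
    rw [List.pairwise_cons] at hs
    obtain ⟨hy, hys⟩ := hs
    by_cases hlt : key x < key y
    · rw [show PySem.List.insertBy (fun a b => decide (key a < key b)) x (y :: ys)
          = x :: y :: ys by simp [PySem.List.insertBy, hlt]]
      by_cases hc : key x == c
      · have hxc : key x = c := by simpa using hc
        have hempty : (y :: ys).filter (fun t => key t == c) = [] := by
          apply List.filter_eq_nil_iff.2
          intro t ht
          have : key x < key t := by
            rcases List.mem_cons.1 ht with rfl | h
            · exact hlt
            · exact lt_of_lt_of_le hlt (hy t h)
          simp [← hxc]; exact ne_of_gt this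
        rw [List.filter_cons, hempty]
        simp [hc]
      · simp [List.filter_cons, hc]
    · rw [show PySem.List.insertBy (fun a b => decide (key a < key b)) x (y :: ys)
          = y :: PySem.List.insertBy (fun a b => decide (key a < key b)) x ys by
            simp [PySem.List.insertBy, hlt]]
      rw [List.filter_cons, List.filter_cons, ih hys]
      split <;> simp

theorem sorted_filter_stable (key : (String × String × String × String) → String) (c : String)
    (xs : List (String × String × String × String)) :
    (PySem.List.sorted xs key false).filter (fun t => key t == c)
      = xs.filter (fun t => key t == c) := by
  induction xs using List.reverseRecOn with
  | nil => simp [PySem.List.sorted]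
  | append_singleton xs x ih =>
    have h1 : PySem.List.sorted (xs ++ [x]) key false
        = PySem.List.insertBy (fun a b => decide (key a < key b)) x (PySem.List.sorted xs key false) := by
      rw [PySem.List.sorted_eq_foldl_insertBy, List.foldl_append, ← PySem.List.sorted_eq_foldl_insertBy]
      rfl
    rw [h1, insertBy_filter key c x _ (PySem.List.sorted_pairwise xs key), ih,
      List.filter_append]
    simp [List.filter]
    split <;> rename_i h
    · simp [h]
    · have hb : (key x == c) = false := by simpa using h
      simp [hb]

-- every element past the equal-key run has a strictly larger key
theorem dropWhile_key_gt (x : String × String × String × String)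
    (rest : List (String × String × String × String))
    (hp : rest.Pairwise (fun a b => keyf a ≤ keyf b))
    (hle : ∀ t ∈ rest, keyf x ≤ keyf t) :
    ∀ t ∈ rest.dropWhile (fun u => keyf u == keyf x), keyf x < keyf t := by
  induction rest with
  | nil => simp
  | cons r rs ih =>
    rw [List.pairwise_cons] at hp
    obtain ⟨hr, hrs⟩ := hp
    by_cases hPr : keyf r == keyf x
    · rw [show List.dropWhile (fun u => keyf u == keyf x) (r :: rs) = List.dropWhile (fun u => keyf u == keyf x) rs by simp [hPr]]
      exact ih hrs (fun t ht => hle t (List.mem_cons_of_mem r ht))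
    · rw [show List.dropWhile (fun u => keyf u == keyf x) (r :: rs) = r :: rs by simp [hPr]]
      intro t ht
      have hxr : keyf x < keyf r :=
        lt_of_le_of_ne (hle r (List.mem_cons_self)) (fun h => hPr (by simp [h]))
      rcases List.mem_cons.1 ht with rfl | h
      · exact hxr
      · exact lt_of_lt_of_le hxr (hr t h)

theorem mem_keysOf (ys : List (String × String × String × String)) (k : String) :
    k ∈ keysOf ys ↔ k ∈ ys.map keyf := by
  induction ys using keysOf.induct with
  | case1 => simp [keysOf]
  | case2 t rest ih =>
    rw [keysOf]
    constructor
    · intro h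
      rcases List.mem_cons.1 h with rfl | h
      · simp
      · have := (ih.1 h)
        rw [List.mem_map] at this ⊢
        obtain ⟨u, hu, rfl⟩ := this
        exact ⟨u, List.mem_cons_of_mem t ((List.dropWhile_sublist _).mem hu), rfl⟩
    · intro h
      rw [List.mem_map] at h
      obtain ⟨u, hu, rfl⟩ := h
      rcases List.mem_cons.1 hu with rfl | hu
      · exact List.mem_cons_self
      · by_cases hk : keyf u = keyf t
        · rw [hk]; exact List.mem_cons_self
        · apply List.mem_cons_of_mem
          apply ih.2
          rw [List.mem_map]
          refine ⟨u, ?_, rfl⟩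
          have : u ∈ rest.takeWhile (fun v => keyf v == keyf t) ++ rest.dropWhile (fun v => keyf v == keyf t) := by
            rw [List.takeWhile_append_dropWhile]; exact hu
          rcases List.mem_append.1 this with h1 | h1
          · exact absurd (by simpa using List.mem_takeWhile_imp h1) hk
          · exact h1

theorem keysOf_pairwise_lt (ys : List (String × String × String × String))
    (hp : ys.Pairwise (fun a b => keyf a ≤ keyf b)) :
    (keysOf ys).Pairwise (· < ·) := by
  induction ys using keysOf.induct with
  | case1 => simp [keysOf]
  | case2 t rest ih =>
    rw [keysOf, List.pairwise_cons]
    rw [List.pairwise_cons] at hp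
    obtain ⟨ht, hrest⟩ := hp
    have hgt := dropWhile_key_gt t rest hrest ht
    refine ⟨?_, ih (List.Pairwise.sublist (List.dropWhile_sublist _) hrest)⟩
    intro k hk
    obtain ⟨u, hu, rfl⟩ := List.mem_map.1 ((mem_keysOf _ k).1 hk)
    exact hgt u hu

-- B's scan computes, for each key in keysOf, the line of its full filter class
theorem groupLines_char (ys : List (String × String × String × String))
    (hp : ys.Pairwise (fun a b => keyf a ≤ keyf b)) :
    groupLines ys = (keysOf ys).map (fun k => lineFor k ((ys.filter (fun t => keyf t == k)).map projf)) := by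
  induction ys using keysOf.induct with
  | case1 => simp [keysOf, groupLines]
  | case2 t rest ih =>
    rw [List.pairwise_cons] at hp
    obtain ⟨ht, hrest⟩ := hp
    have hgt := dropWhile_key_gt t rest hrest ht
    have hL : (fun u : String × String × String × String => u.2.2.2 == t.2.2.2) = (fun u => keyf u == keyf t) := rfl
    set same := rest.takeWhile (fun u => keyf u == keyf t) with hsame
    set after := rest.dropWhile (fun u => keyf u == keyf t) with hafter
    have hsplit : rest = same ++ after := (List.takeWhile_append_dropWhile).symm
    -- the full filter class of keyf t is t :: same
    have hsameeq : ∀ u ∈ same, keyf u = keyf t := fun u hu => by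
      simpa using List.mem_takeWhile_imp hu
    have hfilt_t : (t :: rest).filter (fun u => keyf u == keyf t) = t :: same := by
      rw [List.filter_cons_of_pos (by simp), hsplit, List.filter_append]
      rw [List.filter_eq_self.2 (fun u hu => by simp [hsameeq u hu]),
        List.filter_eq_nil_iff.2 (fun u hu => by simp; exact (ne_of_gt (hgt u hu))),
        List.append_nil]
    -- for keys of after, filtering the whole list equals filtering after
    have hfilt_rest : ∀ k ∈ keysOf after,
        (t :: rest).filter (fun u => keyf u == k) = after.filter (fun u => keyf u == k) := by
      intro k hk
      obtain ⟨w, hw, rfl⟩ := List.mem_map.1 ((mem_keysOf _ k).1 hk)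
      have hkt : keyf t ≠ keyf w := ne_of_lt (hgt w hw)
      rw [List.filter_cons_of_neg (by simp; exact fun h => hkt h), hsplit, List.filter_append,
        List.filter_eq_nil_iff.2 (fun u hu => by simp; rw [hsameeq u hu]; exact fun h => hkt h)]
      simp
    rw [groupLines, hL, keysOf, List.map_cons]
    have hpafter : after.Pairwise (fun a b => keyf a ≤ keyf b) :=
      List.Pairwise.sublist (List.dropWhile_sublist _) hrest
    rw [ih hpafter]
    congr 1
    · -- the emitted line is lineFor (keyf t) of the class (t :: same).map projf
      rw [hfilt_t]
      simp only [lineFor, List.map_cons, List.length_cons, List.headD_cons, List.length_map]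
      rfl
    · exact (List.map_congr_left (fun k hk => by rw [hfilt_rest k hk])).symm

-- A's dict, characterised
theorem byType_items (issues : List (String × String × String × String)) :
    (issues.foldl (fun d t => d.modify t.2.2.2 [] (fun v => v ++ [(t.1, t.2.1, t.2.2.1)]))
        (PySem.Dict.empty : PySem.Dict String (List (String × String × String)))).items
      = (PySem.Set.ofList (issues.map keyf)).map
          (fun k => (k, (issues.filter (fun t => keyf t == k)).map projf)) := by
  have hfold : issues.foldl (fun d t => d.modify t.2.2.2 [] (fun v => v ++ [(t.1, t.2.1, t.2.2.1)]))
      (PySem.Dict.empty : PySem.Dict String (List (String × String × String)))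
    = List.foldl (fun d p => d.modify p.1 [] (fun v => v ++ [p.2])) PySem.Dict.empty
        (issues.map (fun t => (keyf t, projf t))) := by
    rw [List.foldl_map]
    rfl
  have hnd : (issues.foldl (fun d t => d.modify t.2.2.2 [] (fun v => v ++ [(t.1, t.2.1, t.2.2.1)]))
      (PySem.Dict.empty : PySem.Dict String (List (String × String × String)))).keys.Nodup := by
    exact PySem.Dict.nodup_keys_foldl_modify_key issues (fun t => t.2.2.2) []
      (fun d t => fun v => v ++ [(t.1, t.2.1, t.2.2.1)]) PySem.Dict.empty (by simp [PySem.Dict.keys_empty])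
  rw [PySem.Dict.items_eq_map_keys _ hnd []]
  have hkeys : (issues.foldl (fun d t => d.modify t.2.2.2 [] (fun v => v ++ [(t.1, t.2.1, t.2.2.1)]))
      (PySem.Dict.empty : PySem.Dict String (List (String × String × String)))).keys
      = PySem.Set.ofList (issues.map keyf) := by
    rw [PySem.Dict.keys_foldl_modify_key issues (fun t => t.2.2.2) []
      (fun d t => fun v => v ++ [(t.1, t.2.1, t.2.2.1)]) PySem.Dict.empty]
    rw [PySem.Dict.keys_empty, PySem.Set.ofList_eq_foldl]
    rfl
  rw [hkeys]
  apply List.map_congr_left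
  intro k hk
  rw [hfold, PySem.Dict.getD_foldl_modify_append, PySem.Dict.getD_empty, List.filter_map]
  simp [Function.comp_def]

theorem format_issues_warning_spec' (issues : List (String × String × String × String))
    (eval_label : String) (flag : Bool) :
    format_issues_warning issues eval_label flag = format_issues_warning_alt issues eval_label flag := by
  simp only [format_issues_warning, format_issues_warning_alt]
  have hkey : (fun t : String × String × String × String => t.2.2.2) = keyf := rfl
  rw [hkey]
  set S := PySem.Set.ofList (issues.map keyf) with hS
  set G := fun k => (issues.filter (fun t => keyf t == k)).map projf with hG
  set ordered := PySem.List.sorted issues keyf false with hord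
  -- A's middle lines
  have hA : PySem.List.sorted
      (issues.foldl (fun d t => d.modify t.2.2.2 [] (fun v => v ++ [(t.1, t.2.1, t.2.2.1)]))
        (PySem.Dict.empty : PySem.Dict String (List (String × String × String)))).items
      (fun p => p.1) false
      = (PySem.List.sorted S (fun x => x) false).map (fun k => (k, G k)) := by
    rw [byType_items]
    apply PySem.List.sorted_eq_of_perm_of_pairwise_lt
    · exact ((PySem.List.sorted_perm S (fun x => x) false).map _)
    · rw [List.pairwise_map]
      exact PySem.List.sorted_ofList_pairwise_lt (issues.map keyf)
  rw [hA, List.map_map]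
  -- B's middle lines
  have hordp : ordered.Pairwise (fun a b => keyf a ≤ keyf b) := PySem.List.sorted_pairwise issues keyf
  have hB : groupLines ordered
      = (PySem.List.sorted S (fun x => x) false).map (fun k => lineFor k (G k)) := by
    rw [groupLines_char ordered hordp]
    have hkeq : PySem.List.sorted S (fun x => x) false = keysOf ordered := by
      apply PySem.List.sorted_eq_of_perm_of_pairwise_lt
      · rw [List.perm_ext_iff_of_nodup (List.Pairwise.imp (fun h => ne_of_lt h) (keysOf_pairwise_lt ordered hordp)) (PySem.Set.nodup_ofList _)]
        intro k
        rw [mem_keysOf, PySem.Set.mem_ofList]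
        constructor
        · intro h
          obtain ⟨u, hu, rfl⟩ := List.mem_map.1 h
          exact List.mem_map_of_mem ((PySem.List.sorted_perm issues keyf false).mem_iff.1 hu)
        · intro h
          obtain ⟨u, hu, rfl⟩ := List.mem_map.1 h
          exact List.mem_map_of_mem ((PySem.List.sorted_perm issues keyf false).mem_iff.2 hu)
      · exact keysOf_pairwise_lt ordered hordp
    rw [← hkeq]
    apply List.map_congr_left
    intro k _
    rw [hord, sorted_filter_stable keyf k issues]
  rw [hB]
  rfl

-- ===== VERDICT (by name: the statement is the Claim_ definition above) =====
theorem format_issues_warning_spec : Claim_equal_format_issues_warning := by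
  intro issues eval_label flag _
  exact format_issues_warning_spec' issues eval_label flag
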